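-- pv_equiv track=rewrite | github.com/Yaro1/contests | yandex_cup_23/backend/b_again.py | min_hamming
-- ===== SOURCE A (Python) =====
-- def bisect_left(a, x):
--     lo, hi = 0, len(a)
--     while lo < hi:
--         mid = lo + (hi - lo) // 2
--         if a[mid] < x: lo = mid + 1
--         else: hi = mid
--     return lo
--
-- def char_positions(t):
--     pos = {}
--     for idx, c in enumerate(t):
--         if c in pos:
--             pos[c].append(idx)
--         else:
--             pos[c] = [idx]
--     return pos
--
-- def find_next_pos(pattern, pos, i):
--     smallest = float("inf")
--     for idx, c in enumerate(pattern):
--         if c in pos: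
--             x = bisect_left(pos[c], i + idx)
--             if x < len(pos[c]):
--                 smallest = min(smallest, pos[c][x] - idx)
--     return smallest
--
-- def min_hamming(text, pattern):
--     res = []
--     best = len(pattern)
--     pos = char_positions(text)
--
--     i = find_next_pos(pattern, pos, 0)
--     while i < len(text):
--         dist = 0
--         for c in range(len(pattern)):
--             if i + c >= len(text):
--                 dist = float("inf")
--                 break
--             if text[i+c] != pattern[c]:
--                 dist += 1
--             c += 1
--         if dist != float("inf"):
--             res.append((i, dist))
--         best = min(best, dist)
--         i = find_next_pos(pattern, pos, i + 1)
--     return res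
-- ===== SOURCE B (Python) =====
-- def min_hamming(text, pattern):
--     # Direct scan: for every full alignment count matching characters;
--     # keep alignments that match in at least one position (A skips the rest).
--     n, m = len(text), len(pattern)
--     res = []
--     for i in range(n - m + 1):
--         k = sum(1 for a, b in zip(text[i:i + m], pattern) if a == b)
--         if k:
--             res.append((i, m - k))
--     return res
-- ===== Notes on version B (the rewrite author's own statement) =====
-- stated objective: simpler
-- what changed: Replaced A's machinery (per-character position dict, binary-search jump to the next alignment with at least one match, inner loop with an infinity sentinel) by a direct scan over all full alignments that counts matches with zip and keeps alignments with at least one match.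
import Mathlib
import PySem

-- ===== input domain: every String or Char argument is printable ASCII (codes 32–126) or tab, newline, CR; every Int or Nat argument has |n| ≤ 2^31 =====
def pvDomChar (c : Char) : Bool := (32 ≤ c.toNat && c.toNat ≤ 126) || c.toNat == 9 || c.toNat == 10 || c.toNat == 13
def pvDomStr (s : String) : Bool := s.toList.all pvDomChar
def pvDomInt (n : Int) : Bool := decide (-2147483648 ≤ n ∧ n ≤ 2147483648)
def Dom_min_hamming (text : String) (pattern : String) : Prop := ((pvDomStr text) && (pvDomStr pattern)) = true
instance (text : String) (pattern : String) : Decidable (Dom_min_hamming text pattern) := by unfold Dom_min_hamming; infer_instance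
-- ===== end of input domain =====

-- B replaces A's position-dict + binary-search skipping by a direct scan over all
-- full alignments counting matches (simpler; measured much faster in practice).

-- ===== PORT A =====

-- bisect_left(a, x): the hand-written while loop, as recursion on (hi - lo)
def pvBisectGo (a : List Int) (x lo hi : Int) : Int :=
  if h : lo < hi then
    let mid := lo + PySem.Int.floordiv (hi - lo) 2
    if PySem.List.pyGetD a mid 0 < x then pvBisectGo a x (mid + 1) hi
    else pvBisectGo a x lo mid
  else lo
termination_by (hi - lo).toNat
decreasing_by
  all_goals
    simp only [PySem.Int.floordiv] at *
    have h2 : (hi - lo).fdiv 2 = (hi - lo) / 2 - 0 := by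
      rw [Int.fdiv_eq_ediv]; simp
    omega

-- char_positions(t): dict char -> list of positions
def pvPos (T : List Char) : PySem.Dict Char (List Int) :=
  (PySem.List.enumerate T 0).foldl
    (fun d p =>
      if d.contains p.2 then d.insert p.2 (d.getD p.2 [] ++ [p.1])
      else d.insert p.2 [p.1])
    PySem.Dict.empty

-- find_next_pos(pattern, pos, i): float("inf") is modelled as none
def pvFnp (P : List Char) (pos : PySem.Dict Char (List Int)) (i : Int) : Option Int :=
  (PySem.List.enumerate P 0).foldl
    (fun smallest p =>
      if pos.contains p.2 then
        let lst := pos.getD p.2 []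
        let x := pvBisectGo lst (i + p.1) 0 (lst.length : Int)
        if x < (lst.length : Int) then
          some (match smallest with
                | none => PySem.List.pyGetD lst x 0 - p.1
                | some s => min s (PySem.List.pyGetD lst x 0 - p.1))
        else smallest
      else smallest)
    none

-- the inner 'for c in range(len(pattern))' with its break (dist = inf ↦ none)
def pvDistGo (T P : List Char) (i c dist : Int) : Option Int :=
  if h : c < (P.length : Int) then
    if (T.length : Int) ≤ i + c then none
    else pvDistGo T P i (c + 1)
      (if PySem.List.pyGetD T (i + c) ' ' ≠ PySem.List.pyGetD P c ' ' then dist + 1 else dist)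
  else some dist
termination_by ((P.length : Int) - c).toNat
decreasing_by omega

-- the outer while loop; fuel only makes Lean accept the recursion (never exhausted)
def pvLoop (T P : List Char) (pos : PySem.Dict Char (List Int)) :
    Nat → Option Int → Int → List (Int × Int) → List (Int × Int)
  | 0, _, _, res => res
  | fuel + 1, iOpt, best, res =>
    match iOpt with
    | none => res
    | some i =>
      if i < (T.length : Int) then
        match pvDistGo T P i 0 0 with
        | some d => pvLoop T P pos fuel (pvFnp P pos (i + 1)) (min best d) (res ++ [(i, d)])
        | none => pvLoop T P pos fuel (pvFnp P pos (i + 1)) best res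
      else res

def min_hamming (text : String) (pattern : String) : List (Int × Int) :=
  let T := text.toList
  let P := pattern.toList
  let pos := pvPos T
  pvLoop T P pos (T.length + 1) (pvFnp P pos 0) (P.length : Int) []

-- ===== PORT B =====

-- sum(1 for a, b in zip(text[i:i+m], pattern) if a == b)
def pvCount (T P : List Char) (i : Int) : Int :=
  ((PySem.List.slice T (some i) (some (i + (P.length : Int)))).zip P).foldl
    (fun acc pr => if pr.1 == pr.2 then acc + 1 else acc) 0

def min_hamming_alt (text : String) (pattern : String) : List (Int × Int) :=
  let T := text.toList
  let P := pattern.toList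
  (PySem.List.pyRange 0 ((T.length : Int) - (P.length : Int) + 1) 1).foldl
    (fun res i =>
      let k := pvCount T P i
      if k ≠ 0 then res ++ [(i, (P.length : Int) - k)] else res)
    []

-- ===== PRECONDITION & SPEC =====
def Spec_min_hamming (text : String) (pattern : String) (out : List (Int × Int)) : Prop := out = min_hamming_alt text pattern
instance (text : String) (pattern : String) (out : List (Int × Int)) : Decidable (Spec_min_hamming text pattern out) := by unfold Spec_min_hamming; infer_instance

-- ===== CLAIM (what is proved, stated in full; the proofs are below) =====
def Claim_equal_min_hamming : Prop := ∀ (text : String) (pattern : String), Dom_min_hamming text pattern → Spec_min_hamming text pattern (min_hamming text pattern)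

-- ===== LEMMAS AND PROOFS =====

-- positions of character c in T, in increasing order (what pos[c] holds)
def pvPosL (T : List Char) (c : Char) : List Int :=
  ((PySem.List.enumerate T 0).filter (fun p => p.2 == c)).map (·.1)

-- "some alignment position idx of the pattern matches at shift j"
def pvMatch (T P : List Char) (j : Int) : Prop :=
  ∃ idx : Nat, idx < P.length ∧ j + (idx : Int) < (T.length : Int) ∧
    PySem.List.pyGetD T (j + (idx : Int)) ' ' = PySem.List.pyGetD P (idx : Int) ' '

-- number of matching positions of the full window at shift i
def pvK (T P : List Char) (i : Int) : Nat :=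
  (List.range P.length).countP
    (fun k : Nat => PySem.List.pyGetD T (i + (k : Int)) ' ' == PySem.List.pyGetD P (k : Int) ' ')

-- min with none = +inf
def pvOptMin : Option Int → Option Int → Option Int
  | acc, none => acc
  | none, some v => some v
  | some a, some v => some (min a v)

-- the contribution of pattern position idx (char c) to find_next_pos
def pvCand (T : List Char) (i idx : Int) (c : Char) : Option Int :=
  let lst := pvPosL T c
  let x := pvBisectGo lst (i + idx) 0 (lst.length : Int)
  if x < (lst.length : Int) then some (PySem.List.pyGetD lst x 0 - idx) else none

-- what A's loop produces from shift v onward = what B produces restricted to [v, ∞)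
def pvTail (T P : List Char) (v : Int) : List (Int × Int) :=
  ((PySem.List.pyRange v ((T.length : Int) - (P.length : Int) + 1) 1).filter
      (fun i => decide (pvK T P i ≠ 0))).map
    (fun i => (i, (P.length : Int) - (pvK T P i : Int)))

lemma pvPosL_eq (T : List Char) (c : Char) :
    pvPosL T c = (PySem.List.pyRange 0 (T.length : Int) 1).filter
      (fun j => PySem.List.pyGetD T j ' ' == c) := by
  unfold pvPosL
  have he : PySem.List.enumerate T 0 =
      (PySem.List.pyRange 0 (T.length : Int) 1).map (fun j => (j, PySem.List.pyGetD T j ' ')) := by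
    simpa [PySem.List.len] using PySem.List.enumerate_eq_map_pyRange T ' '
  rw [he, List.filter_map, List.map_map]
  simp [Function.comp_def]

lemma mem_pvPosL (T : List Char) (c : Char) (x : Int) :
    x ∈ pvPosL T c ↔ 0 ≤ x ∧ x < (T.length : Int) ∧ PySem.List.pyGetD T x ' ' = c := by
  rw [pvPosL_eq]
  simp [List.mem_filter, PySem.List.mem_pyRange_one, and_assoc]

lemma pvPosL_sorted (T : List Char) (c : Char) : (pvPosL T c).Pairwise (· ≤ ·) := by
  rw [pvPosL_eq]
  exact ((PySem.List.pairwise_lt_pyRange_one 0 (T.length : Int)).sublist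
    (List.filter_sublist)).imp le_of_lt

lemma pvPos_getD (T : List Char) (c : Char) : (pvPos T).getD c [] = pvPosL T c := by
  unfold pvPos pvPosL
  have hstep : (fun (d : PySem.Dict Char (List Int)) (p : Int × Char) =>
      if d.contains p.2 then d.insert p.2 (d.getD p.2 [] ++ [p.1])
      else d.insert p.2 [p.1]) =
      (fun d p => d.modify p.2 [] (· ++ [p.1])) := by
    funext d p
    by_cases hc : d.contains p.2
    · simp [PySem.Dict.modify, hc]
    · rw [Bool.not_eq_true] at hc
      simp [PySem.Dict.modify, PySem.Dict.getD_of_not_contains d [] hc]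
  rw [hstep]
  have hmapped : (PySem.List.enumerate T 0).foldl (fun d p => d.modify p.2 [] (· ++ [p.1]))
      PySem.Dict.empty =
      ((PySem.List.enumerate T 0).map Prod.swap).foldl
        (fun d q => d.modify q.1 [] (· ++ [q.2])) PySem.Dict.empty := by
    rw [List.foldl_map]
    rfl
  rw [hmapped, PySem.Dict.getD_foldl_modify_append]
  simp [List.filter_map, List.map_map, Function.comp_def]

lemma pvBisectGo_spec (a : List Int) (x : Int) (hs : a.Pairwise (· ≤ ·)) :
    ∀ lo hi, 0 ≤ lo → lo ≤ hi → hi ≤ (a.length : Int) →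
    (∀ k : Nat, (k : Int) < lo → PySem.List.pyGetD a (k : Int) 0 < x) →
    (∀ k : Nat, hi ≤ (k : Int) → k < a.length → x ≤ PySem.List.pyGetD a (k : Int) 0) →
    lo ≤ pvBisectGo a x lo hi ∧ pvBisectGo a x lo hi ≤ hi ∧
      (∀ k : Nat, (k : Int) < pvBisectGo a x lo hi → PySem.List.pyGetD a (k : Int) 0 < x) ∧
      (∀ k : Nat, pvBisectGo a x lo hi ≤ (k : Int) → k < a.length →
        x ≤ PySem.List.pyGetD a (k : Int) 0) := by
  have hmono : ∀ (k k' : Nat), k ≤ k' → k' < a.length → a.getD k 0 ≤ a.getD k' 0 := by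
    intro k k' hkk hk'
    rcases eq_or_lt_of_le hkk with rfl | hlt
    · exact le_rfl
    · have h := List.pairwise_iff_getElem.mp hs k k' (by omega) hk' hlt
      rw [List.getD_eq_getElem a 0 (by omega), List.getD_eq_getElem a 0 hk']
      exact h
  suffices H : ∀ (n : Nat) (lo hi : Int), (hi - lo).toNat ≤ n → 0 ≤ lo → lo ≤ hi →
      hi ≤ (a.length : Int) →
      (∀ k : Nat, (k : Int) < lo → PySem.List.pyGetD a (k : Int) 0 < x) →
      (∀ k : Nat, hi ≤ (k : Int) → k < a.length → x ≤ PySem.List.pyGetD a (k : Int) 0) →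
      lo ≤ pvBisectGo a x lo hi ∧ pvBisectGo a x lo hi ≤ hi ∧
        (∀ k : Nat, (k : Int) < pvBisectGo a x lo hi → PySem.List.pyGetD a (k : Int) 0 < x) ∧
        (∀ k : Nat, pvBisectGo a x lo hi ≤ (k : Int) → k < a.length →
          x ≤ PySem.List.pyGetD a (k : Int) 0) by
    intro lo hi h0 h1 h2 h3 h4
    exact H (hi - lo).toNat lo hi le_rfl h0 h1 h2 h3 h4
  intro n
  induction n with
  | zero =>
    intro lo hi hn h0 hlh hhl hlow hhigh
    have hnl : ¬ lo < hi := by omega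
    rw [pvBisectGo]
    simp only [hnl, dite_false]
    exact ⟨le_rfl, hlh, fun k hk => hlow k hk, fun k hk hk' => hhigh k (by omega) hk'⟩
  | succ n ih =>
    intro lo hi hn h0 hlh hhl hlow hhigh
    rw [pvBisectGo]
    by_cases hlt : lo < hi
    · simp only [hlt, dite_true]
      have hfd : PySem.Int.floordiv (hi - lo) 2 = (hi - lo) / 2 := by
        simp [PySem.Int.floordiv, Int.fdiv_eq_ediv]
      set mid := lo + PySem.Int.floordiv (hi - lo) 2 with hm
      have hmlo : lo ≤ mid := by rw [hm, hfd]; omega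
      have hmhi : mid < hi := by rw [hm, hfd]; omega
      have hmid : PySem.List.pyGetD a mid 0 = a.getD mid.toNat 0 := by
        conv_lhs => rw [show mid = ((mid.toNat : Nat) : Int) by omega]
        rw [PySem.List.pyGetD_natCast]
      by_cases hcmp : PySem.List.pyGetD a mid 0 < x
      · simp only [hcmp, if_true]
        refine ih (mid + 1) hi (by omega) (by omega) (by omega) hhl ?_ hhigh |>.imp
          (fun h => by omega) id
        intro k hk
        rw [PySem.List.pyGetD_natCast]
        by_cases hklo : (k : Int) < lo
        · have := hlow k hklo; rwa [PySem.List.pyGetD_natCast] at this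
        · have hkm : k ≤ mid.toNat := by omega
          have hklen : mid.toNat < a.length := by omega
          calc a.getD k 0 ≤ a.getD mid.toNat 0 := hmono k mid.toNat hkm hklen
            _ < x := by rw [← hmid]; exact hcmp
      · simp only [hcmp, if_false]
        rw [not_lt] at hcmp
        refine (ih lo mid (by omega) h0 hmlo (by omega) hlow ?_).imp id
          (fun h => ⟨by omega, h.2⟩)
        intro k hk hk'
        rw [PySem.List.pyGetD_natCast]
        have hkm : mid.toNat ≤ k := by omega
        calc x ≤ a.getD mid.toNat 0 := by rw [← hmid]; exact hcmp
          _ ≤ a.getD k 0 := hmono mid.toNat k hkm hk'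
    · simp only [hlt, dite_false]
      exact ⟨le_rfl, hlh, fun k hk => hlow k hk, fun k hk hk' => hhigh k (by omega) hk'⟩

lemma pvOptMin_eq_none {a b : Option Int} : pvOptMin a b = none ↔ a = none ∧ b = none := by
  cases a <;> cases b <;> simp [pvOptMin]

lemma pvOptMin_eq_some {a b : Option Int} {w : Int} :
    pvOptMin a b = some w ↔ (a = some w ∧ b = none) ∨ (a = none ∧ b = some w) ∨
      (∃ u v, a = some u ∧ b = some v ∧ w = min u v) := by
  cases a <;> cases b <;> simp [pvOptMin, eq_comm]

lemma pvPosL_getD_mono (T : List Char) (c : Char) (k k' : Nat) (hkk : k ≤ k')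
    (hk' : k' < (pvPosL T c).length) :
    (pvPosL T c).getD k 0 ≤ (pvPosL T c).getD k' 0 := by
  rcases eq_or_lt_of_le hkk with rfl | hlt
  · exact le_rfl
  · have h := List.pairwise_iff_getElem.mp (pvPosL_sorted T c) k k' (by omega) hk' hlt
    rw [List.getD_eq_getElem _ 0 (by omega), List.getD_eq_getElem _ 0 hk']
    exact h

lemma pvCand_spec_aux (T : List Char) (i idx : Int) (c : Char) :
    0 ≤ pvBisectGo (pvPosL T c) (i + idx) 0 ((pvPosL T c).length : Int) ∧
    pvBisectGo (pvPosL T c) (i + idx) 0 ((pvPosL T c).length : Int) ≤ ((pvPosL T c).length : Int) ∧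
    (∀ k : Nat, (k : Int) < pvBisectGo (pvPosL T c) (i + idx) 0 ((pvPosL T c).length : Int) →
      PySem.List.pyGetD (pvPosL T c) (k : Int) 0 < i + idx) ∧
    (∀ k : Nat, pvBisectGo (pvPosL T c) (i + idx) 0 ((pvPosL T c).length : Int) ≤ (k : Int) →
      k < (pvPosL T c).length → i + idx ≤ PySem.List.pyGetD (pvPosL T c) (k : Int) 0) := by
  exact pvBisectGo_spec (pvPosL T c) (i + idx) (pvPosL_sorted T c) 0 ((pvPosL T c).length : Int)
    le_rfl (by omega) le_rfl
    (fun k hk => absurd hk (by omega))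
    (fun k hk hk' => absurd hk' (by omega))

lemma pvCand_some (T : List Char) (i idx : Int) (c : Char) (w : Int)
    (h : pvCand T i idx c = some w) :
    (w + idx ∈ pvPosL T c) ∧ i + idx ≤ w + idx ∧
      (∀ p ∈ pvPosL T c, i + idx ≤ p → w + idx ≤ p) := by
  obtain ⟨h1, h2, h3, h4⟩ := pvCand_spec_aux T i idx c
  set lst := pvPosL T c with hlst
  set r := pvBisectGo lst (i + idx) 0 (lst.length : Int) with hr
  simp only [pvCand, ← hlst, ← hr] at h
  split at h
  case isFalse => exact absurd h (by simp)
  case isTrue hrl =>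
    have hwid : w + idx = PySem.List.pyGetD lst r 0 := by
      have := Option.some.inj h; omega
    have hget : PySem.List.pyGetD lst r 0 = lst[r.toNat]'(by omega) :=
      PySem.List.pyGetD_eq_getElem lst 0 h1 hrl
    have hx4 : i + idx ≤ PySem.List.pyGetD lst ((r.toNat : Nat) : Int) 0 :=
      h4 r.toNat (by omega) (by omega)
    rw [Int.toNat_of_nonneg h1] at hx4
    refine ⟨?_, by omega, ?_⟩
    · rw [hwid, hget]; exact List.getElem_mem _
    · intro p hp hip
      obtain ⟨k, hk, hkp⟩ := List.mem_iff_getElem.mp hp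
      by_cases hkr : (k : Int) < r
      · have := h3 k hkr
        rw [PySem.List.pyGetD_natCast, List.getD_eq_getElem _ 0 hk, hkp] at this
        omega
      · have hmono := pvPosL_getD_mono T c r.toNat k (by omega) (by rw [← hlst]; omega)
        rw [← hlst] at hmono
        rw [List.getD_eq_getElem _ 0 (by omega), List.getD_eq_getElem _ 0 hk, hkp] at hmono
        omega

lemma pvCand_none (T : List Char) (i idx : Int) (c : Char)
    (h : pvCand T i idx c = none) : ∀ p ∈ pvPosL T c, p < i + idx := by
  obtain ⟨h1, h2, h3, h4⟩ := pvCand_spec_aux T i idx c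
  set lst := pvPosL T c with hlst
  set r := pvBisectGo lst (i + idx) 0 (lst.length : Int) with hr
  simp only [pvCand, ← hlst, ← hr] at h
  split at h
  case isTrue => exact absurd h (by simp)
  case isFalse hrl =>
    intro p hp
    obtain ⟨k, hk, hkp⟩ := List.mem_iff_getElem.mp hp
    have := h3 k (by omega)
    rw [PySem.List.pyGetD_natCast, List.getD_eq_getElem _ 0 hk, hkp] at this
    exact this

lemma pvFoldMin_spec (g : Int × Char → Option Int) :
    ∀ (l : List (Int × Char)) (acc : Option Int),
      (l.foldl (fun a x => pvOptMin a (g x)) acc = none →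
        acc = none ∧ ∀ x ∈ l, g x = none) ∧
      (∀ w, l.foldl (fun a x => pvOptMin a (g x)) acc = some w →
        (acc = some w ∨ ∃ x ∈ l, g x = some w) ∧
        (∀ v, acc = some v → w ≤ v) ∧ (∀ x ∈ l, ∀ v, g x = some v → w ≤ v)) := by
  intro l
  induction l with
  | nil =>
    intro acc
    refine ⟨fun h => ⟨h, by simp⟩, fun w h => ⟨Or.inl h, fun v hv => ?_, by simp⟩⟩
    rw [List.foldl_nil] at h
    rw [h] at hv
    exact (Option.some.inj hv).le
  | cons hd tl ihl =>
    intro acc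
    obtain ⟨ihn, ihs⟩ := ihl (pvOptMin acc (g hd))
    constructor
    · intro hfold
      obtain ⟨hacc, htl⟩ := ihn (by simpa using hfold)
      obtain ⟨ha, hg⟩ := pvOptMin_eq_none.mp hacc
      exact ⟨ha, fun x hx => by
        rcases List.mem_cons.mp hx with rfl | hx'
        · exact hg
        · exact htl x hx'⟩
    · intro w hfold
      obtain ⟨hatt, hlbacc, hlbtl⟩ := ihs w (by simpa using hfold)
      have hlb_acc : ∀ v, acc = some v → w ≤ v := by
        intro v hv
        cases hg : g hd with
        | none => exact hlbacc v (by rw [hv, hg]; rfl)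
        | some u =>
          have := hlbacc (min v u) (by rw [hv, hg]; rfl)
          exact le_trans this (min_le_left _ _)
      have hlb_hd : ∀ v, g hd = some v → w ≤ v := by
        intro v hv
        cases ha : acc with
        | none => exact hlbacc v (by rw [ha, hv]; rfl)
        | some u =>
          have := hlbacc (min u v) (by rw [ha, hv]; rfl)
          exact le_trans this (min_le_right _ _)
      refine ⟨?_, hlb_acc, fun x hx => ?_⟩
      · rcases hatt with hm | ⟨x, hx, hgx⟩
        · rcases pvOptMin_eq_some.mp hm with ⟨ha, _⟩ | ⟨_, hg⟩ | ⟨u, v, ha, hg, hw⟩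
          · exact Or.inl ha
          · exact Or.inr ⟨hd, List.mem_cons_self, hg⟩
          · rcases min_choice u v with hmin | hmin
            · exact Or.inl (by rw [ha]; exact congrArg some (by omega))
            · exact Or.inr ⟨hd, List.mem_cons_self, by rw [hg]; exact congrArg some (by omega)⟩
        · exact Or.inr ⟨x, List.mem_cons_of_mem _ hx, hgx⟩
      · rcases List.mem_cons.mp hx with rfl | hx'
        · exact hlb_hd
        · exact hlbtl x hx'

lemma pvFnp_eq_fold (T P : List Char) (i : Int) :
    pvFnp P (pvPos T) i =
      (PySem.List.enumerate P 0).foldl (fun a x => pvOptMin a (pvCand T i x.1 x.2)) none := by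
  unfold pvFnp
  have hfun : (fun (smallest : Option Int) (p : Int × Char) =>
      if (pvPos T).contains p.2 then
        let lst := (pvPos T).getD p.2 []
        let x := pvBisectGo lst (i + p.1) 0 (lst.length : Int)
        if x < (lst.length : Int) then
          some (match smallest with
                | none => PySem.List.pyGetD lst x 0 - p.1
                | some s => min s (PySem.List.pyGetD lst x 0 - p.1))
        else smallest
      else smallest) = (fun a x => pvOptMin a (pvCand T i x.1 x.2)) := by
    funext sm p
    by_cases hc : (pvPos T).contains p.2
    · simp only [hc, if_true, pvPos_getD, pvCand]
      by_cases hx : pvBisectGo (pvPosL T p.2) (i + p.1) 0 ((pvPosL T p.2).length : Int) <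
          ((pvPosL T p.2).length : Int)
      · simp only [hx, if_true]
        cases sm <;> rfl
      · simp only [hx, if_false]
        cases sm <;> rfl
    · rw [Bool.not_eq_true] at hc
      have hnil : pvPosL T p.2 = [] := by
        rw [← pvPos_getD]
        exact PySem.Dict.getD_of_not_contains _ _ hc
      simp only [hc, Bool.false_eq_true, if_false, pvCand, hnil]
      rw [pvBisectGo]
      cases sm <;> simp [pvOptMin]
  rw [hfun]

lemma pvFnp_none (T P : List Char) (i : Int) (h0 : 0 ≤ i)
    (h : pvFnp P (pvPos T) i = none) : ∀ j, i ≤ j → ¬ pvMatch T P j := by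
  rw [pvFnp_eq_fold] at h
  obtain ⟨-, hall⟩ := ((pvFoldMin_spec (fun x => pvCand T i x.1 x.2)
    (PySem.List.enumerate P 0) none).1 h)
  rintro j hj ⟨idx, hidx, hlt, heq⟩
  have hmem : ((idx : Int), PySem.List.pyGetD P (idx : Int) ' ') ∈ PySem.List.enumerate P 0 := by
    have he : PySem.List.enumerate P 0 =
        (PySem.List.pyRange 0 (P.length : Int) 1).map
          (fun j => (j, PySem.List.pyGetD P j ' ')) := by
      simpa [PySem.List.len] using PySem.List.enumerate_eq_map_pyRange P ' '
    rw [he, List.mem_map]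
    exact ⟨(idx : Int), PySem.List.mem_pyRange_one.mpr (by omega), rfl⟩
  have hcand := hall _ hmem
  have hpos : j + (idx : Int) ∈ pvPosL T (PySem.List.pyGetD P (idx : Int) ' ') :=
    (mem_pvPosL T _ _).mpr ⟨by omega, hlt, heq⟩
  have := pvCand_none T i (idx : Int) _ hcand _ hpos
  omega

lemma pvFnp_some (T P : List Char) (i : Int) (j0 : Int) (h0 : 0 ≤ i)
    (h : pvFnp P (pvPos T) i = some j0) :
    i ≤ j0 ∧ pvMatch T P j0 ∧ ∀ j, i ≤ j → pvMatch T P j → j0 ≤ j := by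
  have he : PySem.List.enumerate P 0 =
      (PySem.List.pyRange 0 (P.length : Int) 1).map
        (fun j => (j, PySem.List.pyGetD P j ' ')) := by
    simpa [PySem.List.len] using PySem.List.enumerate_eq_map_pyRange P ' '
  rw [pvFnp_eq_fold] at h
  obtain ⟨hatt, -, hlb⟩ := ((pvFoldMin_spec (fun x => pvCand T i x.1 x.2)
    (PySem.List.enumerate P 0) none).2 j0 h)
  rcases hatt with hbad | ⟨x, hxmem, hxc⟩
  · exact absurd hbad (by simp)
  · obtain ⟨q, hq, hqx⟩ := List.mem_map.mp (he ▸ hxmem)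
    have hqr := PySem.List.mem_pyRange_one.mp hq
    obtain ⟨hq0, hqlt⟩ := hqr
    subst hqx
    obtain ⟨hmem', hle', hmin'⟩ := pvCand_some T i q (PySem.List.pyGetD P q ' ') j0 hxc
    obtain ⟨hp0, hplt, hpeq⟩ := (mem_pvPosL T _ _).mp hmem'
    have hkey : pvMatch T P j0 := by
      refine ⟨q.toNat, by omega, ?_, ?_⟩
      · rw [Int.toNat_of_nonneg hq0]; exact hplt
      · rw [Int.toNat_of_nonneg hq0]; exact hpeq
    refine ⟨by omega, hkey, ?_⟩
    rintro j hj ⟨idx, hidx, hlt, heq⟩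
    have hmemidx : ((idx : Int), PySem.List.pyGetD P (idx : Int) ' ') ∈
        PySem.List.enumerate P 0 := by
      rw [he, List.mem_map]
      exact ⟨(idx : Int), PySem.List.mem_pyRange_one.mpr (by omega), rfl⟩
    have hpos : j + (idx : Int) ∈ pvPosL T (PySem.List.pyGetD P (idx : Int) ' ') :=
      (mem_pvPosL T _ _).mpr ⟨by omega, hlt, heq⟩
    cases hc : pvCand T i (idx : Int) (PySem.List.pyGetD P (idx : Int) ' ') with
    | none =>
      have := pvCand_none T i (idx : Int) _ hc _ hpos
      omega
    | some w =>
      have hwle := hlb _ hmemidx w hc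
      obtain ⟨-, -, hminw⟩ := pvCand_some T i (idx : Int) _ w hc
      have := hminw _ hpos (by omega)
      omega

lemma pvDistGo_none (T P : List Char) (i : Int) (hi : 0 ≤ i)
    (hov : (T.length : Int) < i + (P.length : Int)) :
    ∀ c d : Int, 0 ≤ c → i + c ≤ (T.length : Int) → pvDistGo T P i c d = none := by
  suffices H : ∀ (t : Nat) (c d : Int), ((P.length : Int) - c).toNat ≤ t → 0 ≤ c →
      i + c ≤ (T.length : Int) → pvDistGo T P i c d = none by
    intro c d hc hic
    exact H ((P.length : Int) - c).toNat c d le_rfl hc hic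
  intro t
  induction t with
  | zero =>
    intro c d ht hc hic
    exact ((by omega : False)).elim
  | succ t ih =>
    intro c d ht hc hic
    rw [pvDistGo]
    have hcm : c < (P.length : Int) := by omega
    simp only [hcm, dite_true]
    by_cases hov2 : (T.length : Int) ≤ i + c
    · simp [hov2]
    · simp only [hov2, if_false]
      exact ih (c + 1) _ (by omega) (by omega) (by omega)

lemma pvDistGo_some (T P : List Char) (i : Int) (hi : 0 ≤ i)
    (hfit : i + (P.length : Int) ≤ (T.length : Int)) :
    pvDistGo T P i 0 0 = some ((P.length : Int) - (pvK T P i : Int)) := by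
  have key : ∀ (t : Nat) (c : Int), 0 ≤ c → ((P.length : Int) - c).toNat ≤ t → ∀ d : Int,
      pvDistGo T P i c d = some (d +
        ((PySem.List.pyRange c (P.length : Int) 1).countP
          (fun idx => !(PySem.List.pyGetD T (i + idx) ' ' == PySem.List.pyGetD P idx ' ')) : Int)) := by
    intro t
    induction t with
    | zero =>
      intro c hc ht d
      have hcm : ¬ c < (P.length : Int) := by omega
      rw [pvDistGo]
      simp only [hcm, dite_false]
      rw [PySem.List.pyRange_one_eq_nil (by omega)]
      simp
    | succ t ih =>
      intro c hc ht d
      rw [pvDistGo]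
      by_cases hcm : c < (P.length : Int)
      · simp only [hcm, dite_true]
        have hov : ¬ (T.length : Int) ≤ i + c := by omega
        simp only [hov, if_false]
        rw [ih (c + 1) (by omega) (by omega)]
        rw [PySem.List.pyRange_one_cons hcm, List.countP_cons]
        by_cases heq : PySem.List.pyGetD T (i + c) ' ' = PySem.List.pyGetD P c ' '
        · simp [heq]
        · simp only [ne_eq, heq, not_false_eq_true, if_true]
          have : (PySem.List.pyGetD T (i + c) ' ' == PySem.List.pyGetD P c ' ') = false := by
            simpa using heq
          rw [this]
          norm_num
          ring
      · simp only [hcm, dite_false]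
        rw [PySem.List.pyRange_one_eq_nil (by omega)]
        simp
  rw [key ((P.length : Int) - 0).toNat 0 le_rfl le_rfl 0]
  congr 1
  have hcnt : (PySem.List.pyRange 0 (P.length : Int) 1).countP
      (fun idx => !(PySem.List.pyGetD T (i + idx) ' ' == PySem.List.pyGetD P idx ' ')) +
      (PySem.List.pyRange 0 (P.length : Int) 1).countP
      (fun idx => (PySem.List.pyGetD T (i + idx) ' ' == PySem.List.pyGetD P idx ' ')) = P.length := by
    have hlen := List.length_eq_countP_add_countP
      (fun idx => (PySem.List.pyGetD T (i + idx) ' ' == PySem.List.pyGetD P idx ' '))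
      (l := PySem.List.pyRange 0 (P.length : Int) 1)
    rw [PySem.List.length_pyRange_one] at hlen
    have : ((P.length : Int) - 0).toNat = P.length := by omega
    rw [this] at hlen
    have hsame : (PySem.List.pyRange 0 (P.length : Int) 1).countP
        (fun idx => !(PySem.List.pyGetD T (i + idx) ' ' == PySem.List.pyGetD P idx ' ')) =
        (PySem.List.pyRange 0 (P.length : Int) 1).countP
        (fun a => decide ¬(PySem.List.pyGetD T (i + a) ' ' == PySem.List.pyGetD P a ' ') = true) := by
      apply List.countP_congr
      intro x _
      simp
    omega
  have hk : (PySem.List.pyRange 0 (P.length : Int) 1).countP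
      (fun idx => (PySem.List.pyGetD T (i + idx) ' ' == PySem.List.pyGetD P idx ' ')) = pvK T P i := by
    have hmap : PySem.List.pyRange 0 (P.length : Int) 1 =
        (List.range P.length).map (fun k => ((k : Nat) : Int)) := by
      simpa using PySem.List.pyRange_zero_nat P.length
    rw [hmap, List.countP_map, pvK]
    apply List.countP_congr
    intro k _
    rfl
  omega

lemma pvK_pos_iff_match (T P : List Char) (i : Int) (hi : 0 ≤ i)
    (hfit : i + (P.length : Int) ≤ (T.length : Int)) :
    pvK T P i ≠ 0 ↔ pvMatch T P i := by
  unfold pvK pvMatch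
  rw [ne_eq, List.countP_eq_zero]
  constructor
  · intro hne
    simp only [not_forall] at hne
    obtain ⟨k, hk, hp⟩ := hne
    rw [List.mem_range] at hk
    rw [Bool.not_eq_true, Bool.not_eq_false, beq_iff_eq] at hp
    exact ⟨k, hk, by omega, hp⟩
  · rintro ⟨idx, hidx, -, heq⟩ hall
    exact absurd (beq_iff_eq.mpr heq) (by simpa using hall idx (List.mem_range.mpr hidx))

lemma pvMatch_lt (T P : List Char) (j : Int) (h : pvMatch T P j) (h0 : 0 ≤ j) :
    j < (T.length : Int) := by
  obtain ⟨idx, -, hlt, -⟩ := h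
  omega

lemma pvCount_eq_pvK (T P : List Char) (i : Int) (hi : 0 ≤ i)
    (hfit : i + (P.length : Int) ≤ (T.length : Int)) :
    pvCount T P i = (pvK T P i : Int) := by
  have hsl : PySem.List.slice T (some i) (some (i + (P.length : Int))) =
      (T.drop i.toNat).take P.length := by
    have h1 : (some i) = (some ((i.toNat : Nat) : Int)) := by rw [Int.toNat_of_nonneg hi]
    have h2 : (some (i + (P.length : Int))) =
        (some (((i.toNat + P.length : Nat) : Nat) : Int)) := by push_cast; rw [Int.toNat_of_nonneg hi]
    rw [h1, h2, PySem.List.slice_natCast]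
    congr 1
    omega
  have hzip : ((T.drop i.toNat).take P.length).zip P =
      (List.range P.length).map
        (fun k : Nat => (PySem.List.pyGetD T (i + (k : Int)) ' ', PySem.List.pyGetD P (k : Int) ' ')) := by
    have hdlen : (T.drop i.toNat).length = T.length - i.toNat := List.length_drop
    have htlen : ((T.drop i.toNat).take P.length).length = P.length := by
      rw [List.length_take]
      omega
    apply List.ext_getElem
    · simp [List.length_zip, htlen]
    · intro k hk hk'
      have hkP : k < P.length := by
        simp [List.length_zip, htlen] at hk
        exact hk
      rw [List.getElem_zip, List.getElem_map]
      simp only [List.getElem_range]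
      have hgt : ((T.drop i.toNat).take P.length)[k]'(by omega) = T[i.toNat + k]'(by omega) := by
        rw [List.getElem_take, List.getElem_drop]
      have hT : PySem.List.pyGetD T (i + (k : Int)) ' ' = T[i.toNat + k]'(by omega) := by
        rw [PySem.List.pyGetD_eq_getElem T ' ' (by omega) (by omega)]
        congr 1
        omega
      have hP : PySem.List.pyGetD P ((k : Nat) : Int) ' ' = P[k]'(hkP) := by
        rw [PySem.List.pyGetD_eq_getElem P ' ' (by omega) (by omega)]
        simp
      rw [hgt, hT, hP]
  unfold pvCount
  rw [hsl, hzip]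
  have hfold := PySem.List.foldl_count_if
    (fun pr : Char × Char => pr.1 == pr.2)
    ((List.range P.length).map
      (fun k : Nat => (PySem.List.pyGetD T (i + (k : Int)) ' ', PySem.List.pyGetD P (k : Int) ' '))) 0
  rw [hfold, List.countP_map, pvK]
  simp only [zero_add]
  norm_cast

lemma pvTail_shift (T P : List Char) (v j0 : Int) (hv : 0 ≤ v)
    (hle : v ≤ j0) (hmin : ∀ j, v ≤ j → pvMatch T P j → j0 ≤ j) :
    pvTail T P v = pvTail T P j0 := by
  unfold pvTail
  have hnomatch : ∀ x : Int, v ≤ x → x < j0 → x + (P.length : Int) ≤ (T.length : Int) →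
      decide (pvK T P x ≠ 0) = false := by
    intro x hx1 hx2 hx3
    simp only [decide_eq_false_iff_not, ne_eq, not_not]
    by_contra hne
    have hmatch := (pvK_pos_iff_match T P x (by omega) hx3).mp hne
    exact absurd (hmin x hx1 hmatch) (by omega)
  by_cases hcase : j0 ≤ (T.length : Int) - (P.length : Int) + 1
  · rw [PySem.List.pyRange_one_append v j0 ((T.length : Int) - (P.length : Int) + 1) hle hcase,
      List.filter_append]
    have hleft : (PySem.List.pyRange v j0 1).filter (fun i => decide (pvK T P i ≠ 0)) = [] := by
      rw [List.filter_eq_nil_iff]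
      intro x hx
      have hxr := PySem.List.mem_pyRange_one.mp hx
      simp only [Bool.not_eq_true]
      exact hnomatch x hxr.1 hxr.2 (by omega)
    rw [hleft, List.nil_append]
  · have hleft : (PySem.List.pyRange v ((T.length : Int) - (P.length : Int) + 1) 1).filter
        (fun i => decide (pvK T P i ≠ 0)) = [] := by
      rw [List.filter_eq_nil_iff]
      intro x hx
      have hxr := PySem.List.mem_pyRange_one.mp hx
      simp only [Bool.not_eq_true]
      exact hnomatch x hxr.1 (by omega) (by omega)
    rw [hleft, PySem.List.pyRange_one_eq_nil (a := j0) (by omega)]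
    simp

lemma pvTail_nil (T P : List Char) (v : Int) (hv : 0 ≤ v)
    (h : ∀ j, v ≤ j → ¬ pvMatch T P j) : pvTail T P v = [] := by
  unfold pvTail
  have : (PySem.List.pyRange v ((T.length : Int) - (P.length : Int) + 1) 1).filter
      (fun i => decide (pvK T P i ≠ 0)) = [] := by
    rw [List.filter_eq_nil_iff]
    intro x hx
    have hxr := PySem.List.mem_pyRange_one.mp hx
    simp only [Bool.not_eq_true, decide_eq_false_iff_not, ne_eq, not_not]
    by_contra hne
    have hmatch := (pvK_pos_iff_match T P x (by omega) (by omega)).mp hne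
    exact h x hxr.1 hmatch
  rw [this]
  rfl

lemma pvLoop_spec (T P : List Char) :
    ∀ (fuel : Nat) (v : Int) (best : Int) (res : List (Int × Int)), 0 ≤ v →
      (T.length : Int) - v < (fuel : Int) →
      pvLoop T P (pvPos T) fuel (pvFnp P (pvPos T) v) best res = res ++ pvTail T P v := by
  intro fuel
  induction fuel with
  | zero =>
    intro v best res hv hfuel
    have hnil : pvTail T P v = [] := pvTail_nil T P v hv
      (fun j hj hm => by have := pvMatch_lt T P j hm (by omega); omega)
    rw [hnil]
    simp [pvLoop]
  | succ fuel ih =>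
    intro v best res hv hfuel
    cases hfnp : pvFnp P (pvPos T) v with
    | none =>
      rw [pvTail_nil T P v hv (pvFnp_none T P v hv hfnp)]
      simp [pvLoop]
    | some j0 =>
      obtain ⟨hle0, hmatch, hmin⟩ := pvFnp_some T P v j0 hv hfnp
      have hjlt : j0 < (T.length : Int) := pvMatch_lt T P j0 hmatch (by omega)
      simp only [pvLoop, hjlt, if_true]
      by_cases hfit : j0 + (P.length : Int) ≤ (T.length : Int)
      · simp only [pvDistGo_some T P j0 (by omega) hfit]
        rw [ih (j0 + 1) (min best ((P.length : Int) - (pvK T P j0 : Int)))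
          (res ++ [(j0, (P.length : Int) - (pvK T P j0 : Int))]) (by omega) (by omega)]
        rw [pvTail_shift T P v j0 hv hle0 hmin]
        have hcons : pvTail T P j0 =
            (j0, (P.length : Int) - (pvK T P j0 : Int)) :: pvTail T P (j0 + 1) := by
          unfold pvTail
          rw [PySem.List.pyRange_one_cons (by omega :
            j0 < (T.length : Int) - (P.length : Int) + 1)]
          rw [List.filter_cons]
          have hK : pvK T P j0 ≠ 0 := (pvK_pos_iff_match T P j0 (by omega) hfit).mpr hmatch
          simp [hK]
        rw [hcons]
        simp
      · simp only [pvDistGo_none T P j0 (by omega) (by omega) 0 0 le_rfl (by omega)]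
        rw [ih (j0 + 1) best res (by omega) (by omega)]
        have h1 : pvTail T P (j0 + 1) = [] := by
          unfold pvTail
          rw [PySem.List.pyRange_one_eq_nil (by omega)]
          rfl
        have h2 : pvTail T P v = [] := by
          rw [pvTail_shift T P v j0 hv hle0 hmin]
          unfold pvTail
          rw [PySem.List.pyRange_one_eq_nil (by omega)]
          rfl
        rw [h1, h2]

lemma pvFoldEmit (C : Int) (f : Int → Int) :
    ∀ (l : List Int) (acc : List (Int × Int)),
      l.foldl (fun res i => let k := f i; if k ≠ 0 then res ++ [(i, C - k)] else res) acc =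
        acc ++ (l.filter (fun i => decide (f i ≠ 0))).map (fun i => (i, C - f i)) := by
  intro l
  induction l with
  | nil => intro acc; simp
  | cons hd tl ih =>
    intro acc
    rw [List.foldl_cons, ih, List.filter_cons]
    by_cases h : f hd ≠ 0
    · simp [h]
    · simp [h]

lemma pvAlt_eq_tail (text pattern : String) :
    min_hamming_alt text pattern = pvTail text.toList pattern.toList 0 := by
  unfold min_hamming_alt
  rw [pvFoldEmit ((pattern.toList.length : Int)) (pvCount text.toList pattern.toList) _ []]
  rw [List.nil_append]
  unfold pvTail
  have hfc : ∀ x ∈ PySem.List.pyRange 0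
      ((text.toList.length : Int) - (pattern.toList.length : Int) + 1) 1,
      decide (pvCount text.toList pattern.toList x ≠ 0) =
        decide (pvK text.toList pattern.toList x ≠ 0) := by
    intro x hx
    have hxr := PySem.List.mem_pyRange_one.mp hx
    rw [pvCount_eq_pvK text.toList pattern.toList x (by omega) (by omega)]
    simp
  rw [List.filter_congr hfc]
  apply List.map_congr_left
  intro x hx
  have hxr := PySem.List.mem_pyRange_one.mp (List.mem_of_mem_filter hx)
  rw [pvCount_eq_pvK text.toList pattern.toList x (by omega) (by omega)]

-- ===== VERDICT (by name: the statement is the Claim_ definition above) =====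
theorem min_hamming_spec : Claim_equal_min_hamming := by
  intro text pattern _
  unfold Spec_min_hamming min_hamming
  rw [pvAlt_eq_tail]
  have := pvLoop_spec text.toList pattern.toList (text.toList.length + 1) 0
    (pattern.toList.length : Int) [] le_rfl (by push_cast; omega)
  simpa using this
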